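-- pv_equiv track=rewrite | github.com/alexro/pypypy | code_forces/522B.py | solve
-- ===== SOURCE A (Python) =====
-- def solve(a):
--     # накапливать при чтении input-a
--     h1 = h2 = 0
--     all_width = 0
--     for item in a:
--         all_width += item[0]
--         h = item[1]
--         if h >= h1:
--             h2 = h1
--             h1 = h
--         elif h >= h2:
--             h2 = h
--
--     s = [0] * len(a)
--     for i, v in enumerate(a):
--         w = v[0]
--         h = v[1]
--         if h == h1:
--             h = h2
--         else:
--             h = h1
--         t = (all_width - w) * h
--         s[i] = str(t)
--     return ' '.join(s)
-- ===== SOURCE B (Python) =====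
-- def solve(a):
--     n = len(a)
--     all_width = sum(w for w, _ in a)
--     pref = [0] * (n + 1)
--     for i in range(n):
--         pref[i + 1] = max(pref[i], a[i][1])
--     suf = [0] * (n + 1)
--     for i in range(n - 1, -1, -1):
--         suf[i] = max(suf[i + 1], a[i][1])
--     out = []
--     for i, (w, h) in enumerate(a):
--         out.append(str((all_width - w) * max(pref[i], suf[i + 1])))
--     return ' '.join(out)
-- ===== Notes on version B (the rewrite author's own statement) =====
-- stated objective: alternative
-- what changed: Replaces A's top-two-heights tracking fold plus per-item equality test with 0-seeded prefix-max and suffix-max arrays, so each photo's height-after-removal is max(pref[i], suf[i+1]) with no second-maximum bookkeeping.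
import Mathlib
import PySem

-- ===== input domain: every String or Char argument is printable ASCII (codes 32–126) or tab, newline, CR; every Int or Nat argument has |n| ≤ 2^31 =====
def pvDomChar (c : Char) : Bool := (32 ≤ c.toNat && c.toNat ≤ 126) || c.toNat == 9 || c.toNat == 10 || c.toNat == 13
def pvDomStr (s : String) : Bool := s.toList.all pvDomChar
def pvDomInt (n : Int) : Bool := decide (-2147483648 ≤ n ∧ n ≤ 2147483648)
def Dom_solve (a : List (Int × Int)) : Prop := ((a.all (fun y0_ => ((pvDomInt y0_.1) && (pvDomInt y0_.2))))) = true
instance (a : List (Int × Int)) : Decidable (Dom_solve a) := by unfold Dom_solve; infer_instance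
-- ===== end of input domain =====

-- B replaces A's top-two-heights fold and equality test with 0-seeded prefix-max/suffix-max arrays (objective: alternative decomposition, same O(n) cost).
-- ===== PORT A =====
-- literal transliteration of A: one fold tracking (h1, h2, all_width), then a map over enumerate
def solve (a : List (Int × Int)) : String :=
  let st := a.foldl (fun (s : Int × Int × Int) item =>
    let h1 := s.1; let h2 := s.2.1; let aw := s.2.2 + item.1
    let h := item.2
    if h ≥ h1 then (h, h1, aw)
    else if h ≥ h2 then (h1, h, aw)
    else (h1, h2, aw)) (0, 0, 0)
  let h1 := st.1; let h2 := st.2.1; let all_width := st.2.2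
  let s := (PySem.List.enumerate a).map (fun iv =>
    let w := iv.2.1
    let h := iv.2.2
    let h := if h = h1 then h2 else h1
    PySem.Int.toStr ((all_width - w) * h))
  PySem.Str.join " " s

-- ===== PORT B =====
-- B-side helper: the suffix-max array (Source B's `suf`, built right-to-left, seeded with 0)
def sufMax : List Int → List Int
  | [] => [0]
  | h :: t => let s := sufMax t; (max (s.headD 0) h) :: s

-- transliteration of Source B: prefix-max array (scanl = Source B's left-to-right `pref` loop),
-- suffix-max array, then one pass emitting (all_width - w) * max(pref[i], suf[i+1])
def solve_alt (a : List (Int × Int)) : String :=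
  let hs := a.map Prod.snd
  let all_width := (a.map Prod.fst).sum
  let pref := List.scanl max 0 hs
  let suf := sufMax hs
  let out := (PySem.List.enumerate a).map (fun iv =>
    let i := iv.1.toNat
    let w := iv.2.1
    PySem.Int.toStr ((all_width - w) * max (pref.getD i 0) (suf.getD (i + 1) 0)))
  PySem.Str.join " " out

-- ===== PRECONDITION & SPEC =====
def Spec_solve (a : List (Int × Int)) (out : String) : Prop := out = solve_alt a
instance (a : List (Int × Int)) (out : String) : Decidable (Spec_solve a out) := by unfold Spec_solve; infer_instance

-- ===== CLAIM (what is proved, stated in full; the proofs are below) =====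
def Claim_equal_solve : Prop := ∀ (a : List (Int × Int)), Dom_solve a → Spec_solve a (solve a)

-- ===== LEMMAS AND PROOFS =====

-- proof-only model of A's height-tracking fold (widths dropped)
def top2 (p q : Int) : List Int → Int × Int
  | [] => (p, q)
  | h :: t => if h ≥ p then top2 h p t else if h ≥ q then top2 p h t else top2 p q t

theorem fold_proj (l : List (Int × Int)) (p q c : Int) :
    l.foldl (fun (s : Int × Int × Int) item =>
      let h1 := s.1; let h2 := s.2.1; let aw := s.2.2 + item.1
      let h := item.2
      if h ≥ h1 then (h, h1, aw)
      else if h ≥ h2 then (h1, h, aw)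
      else (h1, h2, aw)) (p, q, c)
    = ((top2 p q (l.map Prod.snd)).1, (top2 p q (l.map Prod.snd)).2,
       c + (l.map Prod.fst).sum) := by
  induction l generalizing p q c with
  | nil => simp [top2]
  | cons x t ih =>
    simp only [List.foldl_cons, List.map_cons, List.sum_cons, top2]
    split_ifs <;> rw [ih] <;> refine Prod.ext rfl (Prod.ext rfl ?_) <;> simp <;> ring

theorem foldl_max_max (t : List Int) (a b : Int) :
    t.foldl max (max a b) = max a (t.foldl max b) := by
  induction t generalizing b with
  | nil => rfl
  | cons h t ih =>
    simp only [List.foldl_cons]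
    rw [max_assoc, ih]

theorem left_le_foldl_max (t : List Int) (s : Int) : s ≤ t.foldl max s := by
  induction t generalizing s with
  | nil => exact le_rfl
  | cons h t ih => exact le_trans (le_max_left s h) (ih (max s h))

theorem mem_le_foldl_max (t : List Int) (s x : Int) (hx : x ∈ t) : x ≤ t.foldl max s := by
  induction t generalizing s with
  | nil => simp at hx
  | cons h t ih =>
    rcases List.mem_cons.mp hx with rfl | hx
    · exact le_trans (le_max_right s x) (left_le_foldl_max t (max s x))
    · exact ih (max s h) hx

theorem top2_fst (t : List Int) (p q : Int) : (top2 p q t).1 = t.foldl max p := by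
  induction t generalizing p q with
  | nil => rfl
  | cons h t ih =>
    simp only [top2, List.foldl_cons]
    split_ifs with h1 h2
    · rw [ih]; congr 1; omega
    · rw [ih]; congr 1; omega
    · rw [ih]; congr 1; omega

-- when everything in t is ≤ p, the second component just maxes q through t
theorem top2_snd_le (t : List Int) (p q : Int) (hq : q ≤ p) (hall : ∀ x ∈ t, x ≤ p) :
    (top2 p q t).2 = t.foldl max q := by
  induction t generalizing p q with
  | nil => rfl
  | cons h t ih =>
    have hh : h ≤ p := hall h (by simp)
    simp only [top2, List.foldl_cons]
    split_ifs with h1 h2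
    · have hhp : h = p := le_antisymm hh h1
      rw [ih h p (le_of_eq hhp.symm) (fun x hx => le_trans (hall x (by simp [hx])) (le_of_eq hhp.symm))]
      congr 1; omega
    · rw [ih p h hh (fun x hx => hall x (by simp [hx]))]
      congr 1; omega
    · rw [ih p q hq (fun x hx => hall x (by simp [hx]))]
      congr 1; omega

-- main lemma: A's per-index selection equals the max over the list with index i removed
theorem top2_sel (t : List Int) (p q : Int) (hq : q ≤ p) (i : Nat) (hi : i < t.length) :
    (if t[i] = (top2 p q t).1 then (top2 p q t).2 else (top2 p q t).1)
      = (t.eraseIdx i).foldl max p := by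
  induction t generalizing p q i with
  | nil => simp at hi
  | cons h t ih =>
    cases i with
    | zero =>
      simp only [List.getElem_cons_zero, List.eraseIdx_cons_zero]
      by_cases h1 : h ≥ p
      · rw [show top2 p q (h :: t) = top2 h p t from by simp [top2, h1]]
        have hfst : (top2 h p t).1 = t.foldl max h := top2_fst t h p
        have hdec : t.foldl max h = max h (t.foldl max p) := by
          rw [← foldl_max_max t h p]; congr 1; omega
        by_cases hP : h = (top2 h p t).1
        · rw [if_pos hP]
          have hall : ∀ x ∈ t, x ≤ h := fun x hx => by
            have := mem_le_foldl_max t h x hx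
            rw [← hfst, ← hP] at this; exact this
          rw [top2_snd_le t h p h1 hall]
        · rw [if_neg hP]
          rw [hfst] at hP ⊢
          omega
      · -- h < p: fst = foldl max p t ≥ p > h, so the else branch fires
        have hple : p ≤ t.foldl max p := left_le_foldl_max t p
        have hstep : top2 p q (h :: t) = if h ≥ q then top2 p h t else top2 p q t := by
          simp [top2, h1]
        by_cases h2 : h ≥ q
        · rw [hstep, if_pos h2, top2_fst]
          rw [if_neg (by omega)]
        · rw [hstep, if_neg h2, top2_fst]
          rw [if_neg (by omega)]
    | succ j =>
      have hj : j < t.length := by simpa using hi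
      simp only [List.getElem_cons_succ, List.eraseIdx_cons_succ, List.foldl_cons]
      by_cases h1 : h ≥ p
      · rw [show top2 p q (h :: t) = top2 h p t from by simp [top2, h1],
            show List.foldl max (max p h) (t.eraseIdx j) = List.foldl max h (t.eraseIdx j) from
              by congr 1; omega]
        exact ih h p h1 j hj
      · by_cases h2 : h ≥ q
        · rw [show top2 p q (h :: t) = top2 p h t from by simp [top2, h1, h2],
              show List.foldl max (max p h) (t.eraseIdx j) = List.foldl max p (t.eraseIdx j) from
                by congr 1; omega]
          exact ih p h (by omega) j hj
        · rw [show top2 p q (h :: t) = top2 p q t from by simp [top2, h1, h2],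
              show List.foldl max (max p h) (t.eraseIdx j) = List.foldl max p (t.eraseIdx j) from
                by congr 1; omega]
          exact ih p q hq j hj

theorem scanl_max_getD (t : List Int) (b : Int) (k : Nat) (hk : k ≤ t.length) :
    (List.scanl max b t).getD k 0 = (t.take k).foldl max b := by
  induction t generalizing b k with
  | nil =>
    have : k = 0 := by simpa using hk
    subst this; rfl
  | cons h t ih =>
    cases k with
    | zero => simp [List.scanl_cons]
    | succ j =>
      simp only [List.scanl_cons, List.getD_cons_succ, List.take_succ_cons, List.foldl_cons]
      exact ih (max b h) j (by simpa using hk)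

theorem sufMax_getD (t : List Int) (k : Nat) (hk : k ≤ t.length) :
    (sufMax t).getD k 0 = (t.drop k).foldl max 0 := by
  induction t generalizing k with
  | nil =>
    have : k = 0 := by simpa using hk
    subst this; rfl
  | cons h t ih =>
    cases k with
    | zero =>
      have hhead : (sufMax t).headD 0 = t.foldl max 0 := by
        have := ih 0 (Nat.zero_le _)
        simpa [List.headD_eq_head?, List.head?_eq_getElem?, List.getD] using this
      simp only [sufMax, List.getD_cons_zero, List.drop_zero, List.foldl_cons, hhead]
      rw [max_comm (0 : Int) h, foldl_max_max]
      exact max_comm _ _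
    | succ j =>
      simp only [sufMax, List.getD_cons_succ, List.drop_succ_cons]
      exact ih j (by simpa using hk)

theorem foldl_max_append (u v : List Int) :
    (u ++ v).foldl max 0 = max (u.foldl max 0) (v.foldl max 0) := by
  rw [List.foldl_append]
  have h0 : (0 : Int) ≤ u.foldl max 0 := left_le_foldl_max u 0
  calc v.foldl max (u.foldl max 0) = v.foldl max (max (u.foldl max 0) 0) := by
        rw [max_eq_left h0]
    _ = max (u.foldl max 0) (v.foldl max 0) := foldl_max_max v _ 0

-- ===== VERDICT (by name: the statement is the Claim_ definition above) =====
theorem solve_spec : Claim_equal_solve := by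
  intro a _
  unfold Spec_solve solve solve_alt
  simp only [fold_proj]
  congr 1
  apply List.map_congr_left
  intro iv hiv
  rcases (PySem.List.mem_enumerate_iff a 0 iv).mp hiv with ⟨k, hk, rfl⟩
  simp only [Int.zero_add, Int.toNat_natCast]
  congr 1
  have hs_len : k < (a.map Prod.snd).length := by simpa using hk
  have hA := top2_sel (a.map Prod.snd) 0 0 le_rfl k hs_len
  have hget : (a.map Prod.snd)[k] = a[k].2 := by simp
  rw [hget] at hA
  have hpref := scanl_max_getD (a.map Prod.snd) 0 k (le_of_lt hs_len)
  have hsuf := sufMax_getD (a.map Prod.snd) (k + 1) (by omega)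
  rw [hpref, hsuf, ← foldl_max_append, ← List.eraseIdx_eq_take_drop_succ, ← hA]
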